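-- pv_equiv track=rewrite | github.com/zfifteen/archive | unified-framework/src/discrete/crypto_prime_generator.py | _is_pseudo_mersenne
-- ===== SOURCE A (Python) =====
-- from typing import List, Optional, Tuple, Dict, Any, Union
--
-- def _is_pseudo_mersenne(p: int, c_max: int = 100) -> Tuple[bool, int]:
--     """
--     Check if prime p is pseudo-Mersenne: p = 2^m - c with small c
--
--     Returns:
--         (is_pseudo_mersenne, c_value)
--     """
--     if p <= 2:
--         return False, 0
--
--     # Find the largest power of 2 less than or equal to p
--     m = p.bit_length()
--
--     # Check for exact powers and nearby values
--     for m_test in range(max(1, m-2), m+3):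
--         power_2_m = 2**m_test
--         c = power_2_m - p
--
--         if 0 < c <= c_max:
--             return True, c
--
--     return False, 0
-- ===== SOURCE B (Python) =====
-- from typing import Tuple
--
-- def _is_pseudo_mersenne(p: int, c_max: int = 100) -> Tuple[bool, int]:
--     """
--     Check if p is pseudo-Mersenne: p = 2^m - c with small c.
--     Closed form: since 2^(m-1) <= p < 2^m for m = p.bit_length(), the only
--     exponent that can give a positive c within reach is m itself.
--     """
--     if p <= 2:
--         return False, 0
--     c = (1 << p.bit_length()) - p
--     return (True, c) if c <= c_max else (False, 0)
-- ===== Notes on version B (the rewrite author's own statement) =====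
-- stated objective: simpler
-- what changed: Replaced the 5-iteration search loop over exponents m-2..m+2 with the single closed-form candidate c = 2**bit_length(p) - p, justified by 2^(m-1) <= p < 2^m making m the only exponent that can yield 0 < c <= c_max.
import Mathlib
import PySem

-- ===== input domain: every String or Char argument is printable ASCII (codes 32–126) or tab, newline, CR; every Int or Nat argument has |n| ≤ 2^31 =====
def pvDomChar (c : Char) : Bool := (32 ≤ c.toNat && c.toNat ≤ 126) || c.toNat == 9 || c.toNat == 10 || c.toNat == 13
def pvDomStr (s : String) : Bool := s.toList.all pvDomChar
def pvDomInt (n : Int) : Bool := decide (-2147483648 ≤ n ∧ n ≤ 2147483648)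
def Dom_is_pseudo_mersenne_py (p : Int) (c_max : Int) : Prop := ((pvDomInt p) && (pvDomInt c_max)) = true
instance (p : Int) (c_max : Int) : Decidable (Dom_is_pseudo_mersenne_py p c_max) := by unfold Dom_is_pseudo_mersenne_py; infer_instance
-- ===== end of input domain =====

-- B replaces A's 5-candidate search loop by the single closed-form candidate
-- c = 2^bit_length(p) - p (simpler; exactly the same return value everywhere).

-- ===== PORT A =====
-- the 'for m_test in range(max(1, m-2), m+3)' loop with its early return
def is_pseudo_mersenne_loop (p : Int) (c_max : Int) : List Int → Bool × Int
  | [] => (false, 0)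
  | m_test :: rest =>
      let power_2_m : Int := 2 ^ m_test.toNat   -- 2**m_test; every m_test in the range is ≥ 1, so .toNat is exact
      let c := power_2_m - p
      if 0 < c ∧ c ≤ c_max then (true, c) else is_pseudo_mersenne_loop p c_max rest

def is_pseudo_mersenne_py (p : Int) (c_max : Int) : Bool × Int :=
  if p ≤ 2 then (false, 0)
  else
    let m : Int := (PySem.Int.bitLength p : Int)   -- p.bit_length()
    is_pseudo_mersenne_loop p c_max (PySem.List.pyRange (max 1 (m - 2)) (m + 3) 1)

-- ===== PORT B =====
def is_pseudo_mersenne_py_alt (p : Int) (c_max : Int) : Bool × Int :=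
  if p ≤ 2 then (false, 0)
  else
    let c : Int := (1 <<< PySem.Int.bitLength p) - p   -- (1 << p.bit_length()) - p
    if c ≤ c_max then (true, c) else (false, 0)

-- ===== PRECONDITION & SPEC =====
def Spec_is_pseudo_mersenne_py (p : Int) (c_max : Int) (out : Bool × Int) : Prop := out = is_pseudo_mersenne_py_alt p c_max
instance (p : Int) (c_max : Int) (out : Bool × Int) : Decidable (Spec_is_pseudo_mersenne_py p c_max out) := by unfold Spec_is_pseudo_mersenne_py; infer_instance

-- ===== CLAIM (what is proved, stated in full; the proofs are below) =====
def Claim_equal_is_pseudo_mersenne_py : Prop := ∀ (p : Int) (c_max : Int), Dom_is_pseudo_mersenne_py p c_max → Spec_is_pseudo_mersenne_py p c_max (is_pseudo_mersenne_py p c_max)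

-- ===== LEMMAS AND PROOFS =====

-- the loop skips every candidate whose condition fails
lemma is_pseudo_mersenne_loop_append (p c_max : Int) (l1 l2 : List Int)
    (h : ∀ mt ∈ l1, ¬ (0 < (2:Int) ^ mt.toNat - p ∧ (2:Int) ^ mt.toNat - p ≤ c_max)) :
    is_pseudo_mersenne_loop p c_max (l1 ++ l2) = is_pseudo_mersenne_loop p c_max l2 := by
  induction l1 with
  | nil => rfl
  | cons a t ih =>
      simp only [List.cons_append, is_pseudo_mersenne_loop,
        if_neg (h a (List.mem_cons_self))]
      exact ih (fun mt hm => h mt (List.mem_cons_of_mem a hm))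

-- bit_length brackets p: 2^(m-1) ≤ p < 2^m (Int form, for p > 2)
lemma bitLength_brackets (p : Int) (hp : 2 < p) :
    (2:Int) ^ (PySem.Int.bitLength p - 1) ≤ p ∧ p < 2 ^ PySem.Int.bitLength p := by
  have h1 := PySem.Int.two_pow_bitLength_le p (by omega)
  have h2 := PySem.Int.lt_two_pow_bitLength p
  have habs : (p.natAbs : Int) = p := Int.natAbs_of_nonneg (by omega)
  constructor
  · calc (2:Int) ^ (PySem.Int.bitLength p - 1) = ((2 ^ (PySem.Int.bitLength p - 1) : Nat) : Int) := by push_cast; ring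
      _ ≤ (p.natAbs : Int) := by exact_mod_cast h1
      _ = p := habs
  · calc p = (p.natAbs : Int) := habs.symm
      _ < ((2 ^ PySem.Int.bitLength p : Nat) : Int) := by exact_mod_cast h2
      _ = 2 ^ PySem.Int.bitLength p := by push_cast; ring

-- ===== VERDICT (by name: the statement is the Claim_ definition above) =====
theorem is_pseudo_mersenne_py_spec : Claim_equal_is_pseudo_mersenne_py := by
  intro p c_max _
  unfold Spec_is_pseudo_mersenne_py is_pseudo_mersenne_py is_pseudo_mersenne_py_alt
  by_cases hp : p ≤ 2
  · simp [hp]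
  · simp only [if_neg hp]
    push Not at hp
    obtain ⟨hlow, hhigh⟩ := bitLength_brackets p hp
    set m : Nat := PySem.Int.bitLength p with hm
    have hm2 : 2 ≤ m := by
      by_contra h
      have hle : (2:Int) ^ m ≤ 2 ^ 1 := pow_le_pow_right₀ (by norm_num) (by omega)
      norm_num at hle
      omega
    -- split the range at m: everything below m fails the 0 < c test
    have hsplit : PySem.List.pyRange (max 1 ((m:Int) - 2)) ((m:Int) + 3) 1
        = PySem.List.pyRange (max 1 ((m:Int) - 2)) (m:Int) 1
          ++ PySem.List.pyRange (m:Int) ((m:Int) + 3) 1 :=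
      PySem.List.pyRange_one_append _ _ _ (by omega) (by omega)
    have htail : PySem.List.pyRange (m:Int) ((m:Int) + 3) 1 = [(m:Int), (m:Int) + 1, (m:Int) + 2] := by
      rw [PySem.List.pyRange_one_cons (by omega), PySem.List.pyRange_one_cons (by omega),
        PySem.List.pyRange_one_cons (by omega), PySem.List.pyRange_one_eq_nil (by omega)]
      norm_num
      omega
    have hskip : ∀ mt ∈ PySem.List.pyRange (max 1 ((m:Int) - 2)) (m:Int) 1,
        ¬ (0 < (2:Int) ^ mt.toNat - p ∧ (2:Int) ^ mt.toNat - p ≤ c_max) := by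
      intro mt hmt hcond
      rw [PySem.List.mem_pyRange_one] at hmt
      have hle : mt.toNat ≤ m - 1 := by omega
      have : (2:Int) ^ mt.toNat ≤ 2 ^ (m - 1) := pow_le_pow_right₀ (by norm_num) hle
      omega
    rw [hsplit, is_pseudo_mersenne_loop_append p c_max _ _ hskip, htail]
    -- evaluate the three remaining candidates m, m+1, m+2
    have e0 : ((m:Int)).toNat = m := by omega
    have e1 : ((m:Int) + 1).toNat = m + 1 := by omega
    have e2 : ((m:Int) + 2).toNat = m + 2 := by omega
    have hshift : (1:Int) <<< m = 2 ^ m := by simp [Int.shiftLeft_eq]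
    simp only [is_pseudo_mersenne_loop, e0, e1, e2]
    have q1 : (2:Int) ^ (m + 1) = 2 * 2 ^ m := by ring
    have q2 : (2:Int) ^ (m + 2) = 4 * 2 ^ m := by ring
    have hpos : (0:Int) < 2 ^ m := by positivity
    split_ifs <;> simp_all <;> omega
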